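-- pv_equiv track=rewrite | github.com/zwvista/PSL | Automate/Parks/analyze_image.py | create_grid_string
-- ===== SOURCE A (Python) =====
-- def create_grid_string(coded_matrix):
--     """
--     根据颜色数字矩阵生成一个代表网格布局的多行字符串。
--
--     参数:
--     coded_matrix (list): 由 compress_colors_to_codes 返回的二维数字矩阵。
--
--     返回:
--     str: 一个表示网格布局的多行字符串。
--     """
--     if not coded_matrix or not coded_matrix[0]:
--         return ""
--
--     m = len(coded_matrix)
--     n = len(coded_matrix[0])
--
--     output_lines = []
--
--     # 遍历字符串网格的每一行
--     for r2 in range(2 * m + 1):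
--         line_chars = []
--         # 遍历字符串网格的每一列
--         for c2 in range(2 * n + 2):
--
--             # 规则 1：一行的最后一个字符
--             if c2 == 2 * n + 1:
--                 line_chars.append('`')
--                 continue
--
--             # 规则 2：网格线的交点或单元格中心
--             if (r2 % 2 == 0 and c2 % 2 == 0) or (r2 % 2 != 0 and c2 % 2 != 0):
--                 line_chars.append(' ')
--                 continue
--
--             # 规则 3：最上或最下边界的水平线
--             if (r2 == 0 or r2 == 2 * m) and c2 % 2 != 0:
--                 line_chars.append('-')
--                 continue
--
--             # 规则 4：最左或最右边界的垂直线
--             if (c2 == 0 or c2 == 2 * n) and r2 % 2 != 0: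
--                 line_chars.append('|')
--                 continue
--
--             # 规则 5：内部水平线
--             if r2 % 2 == 0 and c2 % 2 != 0:
--                 r1 = r2 // 2
--                 c1 = (c2 - 1) // 2
--                 # 比较相邻单元格的数字
--                 if coded_matrix[r1 - 1][c1] == coded_matrix[r1][c1]:
--                     line_chars.append(' ')
--                 else:
--                     line_chars.append('-')
--                 continue
--
--             # 规则 6：内部垂直线
--             if r2 % 2 != 0 and c2 % 2 == 0:
--                 r1 = (r2 - 1) // 2
--                 c1 = c2 // 2
--                 # 比较相邻单元格的数字
--                 if coded_matrix[r1][c1 - 1] == coded_matrix[r1][c1]: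
--                     line_chars.append(' ')
--                 else:
--                     line_chars.append('|')
--                 continue
--
--         output_lines.append("".join(line_chars))
--
--     return "\n".join(output_lines)
-- ===== SOURCE B (Python) =====
-- def create_grid_string(coded_matrix):
--     if not coded_matrix or not coded_matrix[0]:
--         return ""
--     n = len(coded_matrix[0])
--
--     def hline(up, down):
--         dashes = ['-' if up is None or down is None or up[c] != down[c] else ' '
--                   for c in range(n)]
--         return ' ' + ''.join(d + ' ' for d in dashes) + '`'
--
--     def vline(row):
--         bars = ['|' if row[c - 1] != row[c] else ' ' for c in range(1, n)] + ['|']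
--         return '|' + ''.join(' ' + b for b in bars) + '`'
--
--     lines = [hline(None, coded_matrix[0])]
--     for i, row in enumerate(coded_matrix):
--         lines.append(vline(row))
--         nxt = coded_matrix[i + 1] if i + 1 < len(coded_matrix) else None
--         lines.append(hline(row, nxt))
--     return '\n'.join(lines)
-- ===== Notes on version B (the rewrite author's own statement) =====
-- stated objective: simpler
-- what changed: A builds the output character-by-character with a six-rule dispatch over a (2m+1)x(2n+2) coordinate grid; B composes whole lines instead: a horizontal-border line builder and a cell-row line builder interleaved over the rows, so the parity/boundary case analysis per character disappears.
import Mathlib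
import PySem

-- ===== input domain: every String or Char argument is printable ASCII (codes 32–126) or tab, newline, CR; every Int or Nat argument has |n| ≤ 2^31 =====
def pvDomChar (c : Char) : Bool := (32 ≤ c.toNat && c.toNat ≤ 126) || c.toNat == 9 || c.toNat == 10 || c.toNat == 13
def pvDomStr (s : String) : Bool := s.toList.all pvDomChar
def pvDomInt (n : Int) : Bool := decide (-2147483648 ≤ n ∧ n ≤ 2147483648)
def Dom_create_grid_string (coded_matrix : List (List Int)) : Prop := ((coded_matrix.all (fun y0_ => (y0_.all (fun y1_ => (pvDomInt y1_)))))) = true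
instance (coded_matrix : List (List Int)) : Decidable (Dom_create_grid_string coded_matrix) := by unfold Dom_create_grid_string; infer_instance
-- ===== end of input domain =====

-- B replaces A's per-character six-rule dispatch over a (2m+1)x(2n+2) coordinate grid by
-- two whole-line builders (horizontal border / cell row) interleaved over the rows (simpler).

-- ===== PORT A =====
-- the character A's inner loop appends for coordinates (r2, c2); A's rules 1-6 are
-- exhaustive, so a total char function is a faithful rendering of the append chain
def cgsChar (coded_matrix : List (List Int)) (m n r2 c2 : Int) : Char :=
  if c2 = 2*n+1 then '`'                                                    -- rule 1
  else if (PySem.Int.mod r2 2 = 0 ∧ PySem.Int.mod c2 2 = 0) ∨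
          (PySem.Int.mod r2 2 ≠ 0 ∧ PySem.Int.mod c2 2 ≠ 0) then ' '        -- rule 2
  else if (r2 = 0 ∨ r2 = 2*m) ∧ PySem.Int.mod c2 2 ≠ 0 then '-'             -- rule 3
  else if (c2 = 0 ∨ c2 = 2*n) ∧ PySem.Int.mod r2 2 ≠ 0 then '|'             -- rule 4
  else if PySem.Int.mod r2 2 = 0 ∧ PySem.Int.mod c2 2 ≠ 0 then              -- rule 5
    let r1 := PySem.Int.floordiv r2 2
    let c1 := PySem.Int.floordiv (c2-1) 2
    -- Python raises IndexError on a too-short row; pyGetD's default is excluded by Pre_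
    if PySem.List.pyGetD (PySem.List.pyGetD coded_matrix (r1-1) []) c1 0 =
       PySem.List.pyGetD (PySem.List.pyGetD coded_matrix r1 []) c1 0 then ' ' else '-'
  else                                                                      -- rule 6
    let r1 := PySem.Int.floordiv (r2-1) 2
    let c1 := PySem.Int.floordiv c2 2
    if PySem.List.pyGetD (PySem.List.pyGetD coded_matrix r1 []) (c1-1) 0 =
       PySem.List.pyGetD (PySem.List.pyGetD coded_matrix r1 []) c1 0 then ' ' else '|'

-- line_chars for one r2 ("".join of single chars = String.ofList of the char list)
def cgsLine (coded_matrix : List (List Int)) (m n r2 : Int) : List Char :=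
  (PySem.List.pyRange 0 (2*n+2) 1).foldl (fun acc c2 => acc ++ [cgsChar coded_matrix m n r2 c2]) []

def create_grid_string (coded_matrix : List (List Int)) : String :=
  if coded_matrix = [] ∨ coded_matrix.headD [] = [] then "" else
    let m : Int := (coded_matrix.length : Int)
    let n : Int := ((coded_matrix.headD []).length : Int)
    let output_lines :=
      (PySem.List.pyRange 0 (2*m+1) 1).foldl
        (fun acc r2 => acc ++ [String.ofList (cgsLine coded_matrix m n r2)]) []
    PySem.Str.join "\n" output_lines

-- ===== PORT B =====
def altHline (n : Int) (up dn : Option (List Int)) : String :=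
  let dashes := (PySem.List.pyRange 0 n 1).map (fun c =>
    match up, dn with
    | some u, some d =>
        if ¬ (PySem.List.pyGetD u c 0 = PySem.List.pyGetD d c 0) then '-' else ' '
    | _, _ => '-')
  String.ofList ((' ' :: dashes.foldl (fun acc d => acc ++ [d, ' ']) []) ++ ['`'])

def altVline (n : Int) (row : List Int) : String :=
  let bars := (PySem.List.pyRange 1 n 1).map (fun c =>
      if ¬ (PySem.List.pyGetD row (c-1) 0 = PySem.List.pyGetD row c 0) then '|' else ' ') ++ ['|']
  String.ofList (('|' :: bars.foldl (fun acc b => acc ++ [' ', b]) []) ++ ['`'])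

def create_grid_string_alt (coded_matrix : List (List Int)) : String :=
  if coded_matrix = [] ∨ coded_matrix.headD [] = [] then "" else
    let n : Int := ((coded_matrix.headD []).length : Int)
    let lines :=
      (PySem.List.enumerate coded_matrix 0).foldl
        (fun acc p =>
          acc ++ [altVline n p.2,
                  altHline n (some p.2)
                    (if p.1 + 1 < (coded_matrix.length : Int)
                     then some (PySem.List.pyGetD coded_matrix (p.1 + 1) []) else none)])
        [altHline n none (some (coded_matrix.headD []))]
    PySem.Str.join "\n" lines

-- ===== PRECONDITION & SPEC =====
-- Pre_ excludes exactly the inputs where Python A raises IndexError: a matrix (with at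
-- least two rows) in which some row is shorter than the first row.
def Pre_create_grid_string (coded_matrix : List (List Int)) : Prop :=
  ∀ r ∈ coded_matrix, (coded_matrix.headD []).length ≤ r.length
instance (coded_matrix : List (List Int)) : Decidable (Pre_create_grid_string coded_matrix) := by unfold Pre_create_grid_string; infer_instance
def pvWitness_create_grid_string : List (List Int) := [[1, 2], [1, 1]]

def Spec_create_grid_string (coded_matrix : List (List Int)) (out : String) : Prop := out = create_grid_string_alt coded_matrix
instance (coded_matrix : List (List Int)) (out : String) : Decidable (Spec_create_grid_string coded_matrix out) := by unfold Spec_create_grid_string; infer_instance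

-- ===== CLAIM (what is proved, stated in full; the proofs are below) =====
def Claim_equal_create_grid_string : Prop := ∀ (coded_matrix : List (List Int)), Dom_create_grid_string coded_matrix → Pre_create_grid_string coded_matrix → Spec_create_grid_string coded_matrix (create_grid_string coded_matrix)

-- ===== LEMMAS AND PROOFS =====

-- A's char rule with the Int bookkeeping (mod/floordiv/pyGetD on casts) discharged: pure Nat coordinates
def idealChar (M : List (List Int)) (m n r2 c2 : Nat) : Char :=
  if c2 = 2*n+1 then '`'
  else if r2 % 2 = c2 % 2 then ' '
  else if r2 % 2 = 0 then
    (if r2 = 0 ∨ r2 = 2*m then '-'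
     else if (M.getD (r2/2 - 1) []).getD (c2/2) 0 = (M.getD (r2/2) []).getD (c2/2) 0 then ' ' else '-')
  else
    (if c2 = 0 ∨ c2 = 2*n then '|'
     else if (M.getD (r2/2) []).getD (c2/2 - 1) 0 = (M.getD (r2/2) []).getD (c2/2) 0 then ' ' else '|')

theorem cgsChar_cast (M : List (List Int)) (m n r2 c2 : Nat) :
    cgsChar M (m:Int) (n:Int) (r2:Int) (c2:Int) = idealChar M m n r2 c2 := by
  have hm2 : ∀ a : Int, PySem.Int.mod a 2 = a % 2 := fun a => PySem.Int.mod_eq_emod_of_pos (by norm_num)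
  have hd2 : ∀ a : Int, PySem.Int.floordiv a 2 = a / 2 := fun a => PySem.Int.floordiv_eq_ediv_of_pos (by norm_num)
  simp only [cgsChar, idealChar, hm2, hd2]
  by_cases hb : c2 = 2*n+1
  · rw [if_pos (by omega : (c2:Int) = 2*(n:Int)+1), if_pos hb]
  · rw [if_neg (by omega : ¬ (c2:Int) = 2*(n:Int)+1), if_neg hb]
    by_cases hp : r2 % 2 = c2 % 2
    · rw [if_pos (by omega), if_pos hp]
    · rw [if_neg (by omega), if_neg hp]
      by_cases hr : r2 % 2 = 0
      · rw [if_pos hr]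
        by_cases h3 : r2 = 0 ∨ r2 = 2*m
        · rw [if_pos (by omega), if_pos h3]
        · rw [if_neg (by omega), if_neg h3, if_neg (by omega), if_pos (by omega)]
          have e1 : ((r2:Int))/2 - 1 = (((r2/2 - 1 : Nat)):Int) := by omega
          have e2 : ((c2:Int) - 1)/2 = (((c2/2 : Nat)):Int) := by omega
          have e3 : ((r2:Int))/2 = (((r2/2 : Nat)):Int) := by omega
          rw [e1, e2, e3]
          simp only [PySem.List.pyGetD_natCast]
      · rw [if_neg hr]
        by_cases h4 : c2 = 0 ∨ c2 = 2*n
        · rw [if_neg (by omega), if_pos (by omega), if_pos h4]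
        · rw [if_neg (by omega), if_neg (by omega), if_neg (by omega), if_neg h4]
          have e1 : ((r2:Int) - 1)/2 = (((r2/2 : Nat)):Int) := by omega
          have e2 : ((c2:Int))/2 - 1 = (((c2/2 - 1 : Nat)):Int) := by omega
          have e3 : ((c2:Int))/2 = (((c2/2 : Nat)):Int) := by omega
          rw [e1, e2, e3]
          simp only [PySem.List.pyGetD_natCast]

-- the string A builds for grid line k, in Nat coordinates
def lineStrI (M : List (List Int)) (m n k : Nat) : String :=
  String.ofList ((List.range (2*n+2)).map (fun c2 => idealChar M m n k c2))

theorem interleave {α : Type} (g : Nat → α) : ∀ (k s : Nat),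
    (List.range' (2*s+1) (2*k)).map g
      = (List.range' s k).flatMap (fun c => [g (2*c+1), g (2*c+2)]) := by
  intro k
  induction k with
  | zero => simp
  | succ k ih =>
    intro s
    have h2 : 2*(k+1) = (2*k+1)+1 := by ring
    rw [h2, List.range'_succ, List.range'_succ, List.range'_succ]
    have h3 : 2*s+1+1+1 = 2*(s+1)+1 := by ring
    simp only [List.map_cons, List.flatMap_cons, h3, ih (s+1)]
    norm_num [List.cons_append]

theorem lineChars_decomp (M : List (List Int)) (m n k : Nat) :
    (List.range (2*n+2)).map (fun c2 => idealChar M m n k c2)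
      = idealChar M m n k 0
          :: ((List.range n).flatMap
                (fun c => [idealChar M m n k (2*c+1), idealChar M m n k (2*c+2)])
              ++ [idealChar M m n k (2*n+1)]) := by
  have h1 : 2*n+2 = ((2*n)+1)+1 := by ring
  have h2 := interleave (fun c2 => idealChar M m n k c2) n 0
  norm_num at h2
  rw [List.range_eq_range', h1, List.range'_succ, List.range'_1_concat, List.map_cons,
      List.map_append, h2, ← List.range_eq_range']
  simp [Nat.add_comm]

-- per-character evaluations of idealChar
theorem ic_tick (M : List (List Int)) (m n k : Nat) : idealChar M m n k (2*n+1) = '`' := by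
  unfold idealChar; rw [if_pos rfl]

theorem ic_vbar_left (M : List (List Int)) (m n i : Nat) : idealChar M m n (2*i+1) 0 = '|' := by
  unfold idealChar; split_ifs <;> first | rfl | (exfalso; omega)

theorem ic_cell_center (M : List (List Int)) (m n i c : Nat) (hc : c < n) :
    idealChar M m n (2*i+1) (2*c+1) = ' ' := by
  unfold idealChar; split_ifs <;> first | rfl | (exfalso; omega)

theorem ic_vbar_right (M : List (List Int)) (m n i : Nat) : idealChar M m n (2*i+1) (2*n) = '|' := by
  unfold idealChar; split_ifs <;> first | rfl | (exfalso; omega)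

theorem ic_vbar_mid (M : List (List Int)) (m n i c : Nat) (hc : c + 1 < n) :
    idealChar M m n (2*i+1) (2*c+2)
      = if (M.getD i []).getD c 0 = (M.getD i []).getD (c+1) 0 then ' ' else '|' := by
  unfold idealChar
  rw [if_neg (by omega), if_neg (by omega), if_neg (by omega), if_neg (by omega)]
  have e1 : (2*i+1)/2 = i := by omega
  have e2 : (2*c+2)/2 - 1 = c := by omega
  have e3 : (2*c+2)/2 = c+1 := by omega
  rw [e1, e2, e3]

theorem ic_junction (M : List (List Int)) (m n : Nat) (r2 c2 : Nat) (hr : r2 % 2 = 0)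
    (hc : c2 % 2 = 0) : idealChar M m n r2 c2 = ' ' := by
  unfold idealChar; split_ifs <;> first | rfl | (exfalso; omega)

theorem ic_hdash_boundary (M : List (List Int)) (m n r2 c : Nat) (hr : r2 = 0 ∨ r2 = 2*m)
    (hc : c < n) : idealChar M m n r2 (2*c+1) = '-' := by
  unfold idealChar; split_ifs <;> first | rfl | (exfalso; omega)

theorem ic_hdash_mid (M : List (List Int)) (m n i c : Nat) (h0 : 0 < i) (hi : i < m)
    (hc : c < n) :
    idealChar M m n (2*i) (2*c+1)
      = if (M.getD (i-1) []).getD c 0 = (M.getD i []).getD c 0 then ' ' else '-' := by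
  unfold idealChar
  rw [if_neg (by omega), if_neg (by omega), if_pos (by omega), if_neg (by omega)]
  have e1 : (2*i)/2 - 1 = i - 1 := by omega
  have e2 : (2*c+1)/2 = c := by omega
  have e3 : (2*i)/2 = i := by omega
  rw [e1, e2, e3]

-- B's horizontal-border line, as a char list
theorem altHline_none (n : Nat) (v : Option (List Int)) :
    altHline (n:Int) none v
      = String.ofList (' ' :: ((List.range n).flatMap (fun _ => ['-', ' ']) ++ ['`'])) := by
  unfold altHline
  dsimp only
  rw [PySem.List.foldl_append_eq_flatMap (g := fun d => [d, ' ']), PySem.List.pyRange_zero_natCast,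
      List.map_map, List.flatMap_map]
  rfl

theorem altHline_some_none (n : Nat) (u : List Int) :
    altHline (n:Int) (some u) none
      = String.ofList (' ' :: ((List.range n).flatMap (fun _ => ['-', ' ']) ++ ['`'])) := by
  unfold altHline
  dsimp only
  rw [PySem.List.foldl_append_eq_flatMap (g := fun d => [d, ' ']), PySem.List.pyRange_zero_natCast,
      List.map_map, List.flatMap_map]
  rfl

theorem altHline_some_some (n : Nat) (u d : List Int) :
    altHline (n:Int) (some u) (some d)
      = String.ofList (' ' :: ((List.range n).flatMap
            (fun c => [if u.getD c 0 = d.getD c 0 then ' ' else '-', ' ']) ++ ['`'])) := by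
  unfold altHline
  dsimp only
  rw [PySem.List.foldl_append_eq_flatMap (g := fun d => [d, ' ']), PySem.List.pyRange_zero_natCast,
      List.map_map, List.flatMap_map]
  simp only [List.nil_append, List.cons_append]
  congr 2
  congr 1
  apply List.flatMap_congr
  intro c _
  simp only [Function.comp, PySem.List.pyGetD_natCast]
  by_cases h : u.getD c 0 = d.getD c 0 <;> simp [h]

-- B's cell line, as a char list
theorem altVline_chars (n : Nat) (hn : 1 ≤ n) (row : List Int) :
    altVline (n:Int) row
      = String.ofList ('|' :: (((List.range (n-1)).flatMap
            (fun c => [' ', if row.getD c 0 = row.getD (c+1) 0 then ' ' else '|'])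
          ++ [' ', '|']) ++ ['`'])) := by
  unfold altVline
  dsimp only
  rw [PySem.List.foldl_append_eq_flatMap (g := fun b => [' ', b]), List.flatMap_append,
      PySem.List.pyRange_one, List.map_map, List.flatMap_map]
  have ht : ((n:Int) - 1).toNat = n - 1 := by omega
  rw [ht]
  simp only [List.nil_append, List.cons_append, List.flatMap_cons, List.flatMap_nil,
    List.append_nil]
  congr 3
  congr 1
  apply List.flatMap_congr
  intro c _
  simp only [Function.comp]
  have e1 : 1 + (c:Int) - 1 = ((c:Nat):Int) := by omega
  have e2 : 1 + (c:Int) = (((c+1 : Nat)):Int) := by omega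
  simp only [e2, PySem.List.pyGetD_natCast]
  by_cases h : row.getD c 0 = row.getD (c+1) 0 <;> simp [h]

-- A's cell line = B's cell line
theorem lineA_cell (M : List (List Int)) (m n i : Nat) (hn : 1 ≤ n) :
    lineStrI M m n (2*i+1) = altVline (n:Int) (M.getD i []) := by
  rw [altVline_chars n hn]
  unfold lineStrI
  rw [lineChars_decomp, ic_vbar_left, ic_tick]
  have hsplit : List.range n = List.range (n-1) ++ [n-1] := by
    conv_lhs => rw [show n = (n-1)+1 by omega]
    rw [List.range_succ]
  rw [hsplit, List.flatMap_append]
  simp only [List.flatMap_cons, List.flatMap_nil, List.append_nil]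
  rw [ic_cell_center M m n i (n-1) (by omega), show 2*(n-1)+2 = 2*n by omega, ic_vbar_right]
  simp only [List.append_assoc, List.cons_append, List.nil_append]
  congr 2
  congr 1
  apply List.flatMap_congr
  intro c hc
  have hc' : c < n - 1 := List.mem_range.mp hc
  rw [ic_cell_center M m n i c (by omega), ic_vbar_mid M m n i c (by omega)]

-- A's top border line = B's border line with no row above
theorem lineA_border_top (M : List (List Int)) (m n : Nat) (v : Option (List Int)) :
    lineStrI M m n 0 = altHline (n:Int) none v := by
  rw [altHline_none]
  unfold lineStrI
  rw [lineChars_decomp, ic_junction M m n 0 0 (by omega) (by omega), ic_tick]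
  congr 2
  congr 1
  apply List.flatMap_congr
  intro c hc
  have hc' : c < n := List.mem_range.mp hc
  rw [ic_hdash_boundary M m n 0 c (Or.inl rfl) hc', ic_junction M m n 0 (2*c+2) (by omega) (by omega)]

-- A's bottom border line = B's border line with no row below
theorem lineA_border_bot (M : List (List Int)) (m n : Nat) (u : List Int) :
    lineStrI M m n (2*m) = altHline (n:Int) (some u) none := by
  rw [altHline_some_none]
  unfold lineStrI
  rw [lineChars_decomp, ic_junction M m n (2*m) 0 (by omega) (by omega), ic_tick]
  congr 2
  congr 1
  apply List.flatMap_congr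
  intro c hc
  have hc' : c < n := List.mem_range.mp hc
  rw [ic_hdash_boundary M m n (2*m) c (Or.inr rfl) hc',
      ic_junction M m n (2*m) (2*c+2) (by omega) (by omega)]

-- A's interior border line = B's border line comparing the two adjacent rows
theorem lineA_border_mid (M : List (List Int)) (m n i : Nat) (hi : i + 1 < m) :
    lineStrI M m n (2*i+2) = altHline (n:Int) (some (M.getD i [])) (some (M.getD (i+1) [])) := by
  rw [altHline_some_some]
  unfold lineStrI
  rw [lineChars_decomp, ic_junction M m n (2*i+2) 0 (by omega) (by omega), ic_tick]
  congr 2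
  congr 1
  apply List.flatMap_congr
  intro c hc
  have hc' : c < n := List.mem_range.mp hc
  rw [show 2*i+2 = 2*(i+1) by ring, ic_hdash_mid M m n (i+1) c (by omega) hi hc',
      ic_junction M m n (2*(i+1)) (2*c+2) (by omega) (by omega)]
  simp

-- the interleaved tail: A's grid lines 2i+1 .. 2m match B's per-row pairs
theorem rows_lemma (M : List (List Int)) (n : Nat) (hn : 1 ≤ n) :
    ∀ (rest : List (List Int)) (i : Nat), M.drop i = rest →
    (List.range' (2*i+1) (2*rest.length)).map (fun k => lineStrI M M.length n k)
      = (PySem.List.enumerate rest (i:Int)).flatMap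
          (fun p => [altVline (n:Int) p.2,
                     altHline (n:Int) (some p.2)
                       (if p.1 + 1 < (M.length:Int)
                        then some (PySem.List.pyGetD M (p.1 + 1) []) else none)]) := by
  intro rest
  induction rest with
  | nil => intro i h; simp [PySem.List.enumerate]
  | cons r rs ih =>
    intro i h
    have hge : M[i]? = some r := by
      have h0 : (M.drop i)[0]? = some r := by rw [h]; rfl
      rwa [List.getElem?_drop, Nat.add_zero] at h0
    have hilt : i < M.length := (List.getElem?_eq_some_iff.mp hge).1
    have hget : M.getD i [] = r := by rw [List.getD_eq_getElem?_getD, hge]; rfl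
    have hdrop1 : M.drop (i+1) = rs := by
      have h1 : M.drop (i+1) = (M.drop i).drop 1 := by rw [List.drop_drop, Nat.add_comm]
      rw [h1, h]; rfl
    rw [show (r :: rs).length = rs.length + 1 from rfl,
        show 2*(rs.length+1) = ((2*rs.length+1)+1) by ring,
        List.range'_succ, List.range'_succ, PySem.List.enumerate_cons]
    simp only [List.map_cons, List.flatMap_cons]
    congr 1
    · rw [lineA_cell M M.length n i hn, hget]
    congr 1
    · cases rs with
      | nil =>
        have hlen : i+1 = M.length := by
          have h2 := congrArg List.length hdrop1
          simp only [List.length_drop, List.length_nil] at h2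
          omega
        rw [if_neg (by omega), show 2*i+1+1 = 2*M.length by omega,
            lineA_border_bot M M.length n r]
      | cons r' rs' =>
        have hlt : i+1 < M.length := by
          have h2 := congrArg List.length hdrop1
          simp only [List.length_drop, List.length_cons] at h2
          omega
        have hge' : M[i+1]? = some r' := by
          have h0 : (M.drop (i+1))[0]? = some r' := by rw [hdrop1]; rfl
          rwa [List.getElem?_drop, Nat.add_zero] at h0
        have hget' : M.getD (i+1) [] = r' := by rw [List.getD_eq_getElem?_getD, hge']; rfl
        rw [if_pos (by omega),
            show ((i:Int)+1) = ((i+1 : Nat) : Int) by push_cast; ring,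
            PySem.List.pyGetD_natCast,
            show 2*i+1+1 = 2*i+2 by ring,
            lineA_border_mid M M.length n i hlt, hget, hget']
    · have hrec := ih (i+1) hdrop1
      rw [show 2*i+1+1+1 = 2*(i+1)+1 by ring, hrec,
          show ((i+1 : Nat) : Int) = (i:Int)+1 by push_cast; ring]
      simp

theorem create_grid_string_spec : Claim_equal_create_grid_string := by
  intro M _ _
  unfold Spec_create_grid_string create_grid_string create_grid_string_alt
  by_cases h : M = [] ∨ M.headD [] = []
  · rw [if_pos h, if_pos h]
  · rw [if_neg h, if_neg h]
    dsimp only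
    congr 1
    obtain ⟨hM, hhd⟩ := not_or.mp h
    have hm : 1 ≤ M.length := by
      cases M with
      | nil => exact absurd rfl hM
      | cons a l => simp
    have hn : 1 ≤ (M.headD []).length := List.length_pos_iff.mpr hhd
    -- A's line loop as a map of lineStrI over 0..2m
    rw [PySem.List.foldl_append_singleton_eq_map,
        show 2*((M.length:Nat):Int)+1 = ((2*M.length+1 : Nat):Int) by push_cast; ring,
        PySem.List.pyRange_zero_natCast, List.nil_append]
    have hline : ∀ k : Nat,
        String.ofList (cgsLine M (M.length:Int) ((M.headD []).length:Int) (k:Int))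
          = lineStrI M M.length (M.headD []).length k := by
      intro k
      unfold cgsLine lineStrI
      rw [PySem.List.foldl_append_singleton_eq_map,
          show 2*(((M.headD []).length:Nat):Int)+2 = ((2*(M.headD []).length+2 : Nat):Int) by
            push_cast; ring,
          PySem.List.pyRange_zero_natCast, List.map_map, List.nil_append]
      congr 1
      apply List.map_congr_left
      intro c2 _
      exact cgsChar_cast M M.length (M.headD []).length k c2
    have hmA : ((List.range (2*M.length+1)).map (fun (k:Nat) => (k:Int))).map
          (fun r2 => String.ofList (cgsLine M (M.length:Int) ((M.headD []).length:Int) r2))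
        = (List.range (2*M.length+1)).map (fun k => lineStrI M M.length (M.headD []).length k) := by
      rw [List.map_map]
      exact List.map_congr_left (fun k _ => hline k)
    rw [hmA]
    -- B's row loop as a flatMap over enumerate
    have hmB := PySem.List.foldl_append_eq_flatMap
          (l := PySem.List.enumerate M 0)
          (acc := [altHline ((M.headD []).length:Int) none (some (M.headD []))])
          (g := fun (p : Int × List Int) =>
                  [altVline ((M.headD []).length:Int) p.2,
                   altHline ((M.headD []).length:Int) (some p.2)
                     (if p.1 + 1 < (M.length:Int)
                      then some (PySem.List.pyGetD M (p.1 + 1) []) else none)])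
    rw [hmB]
    -- split off A's top border line and use the row interleaving
    rw [List.range_eq_range', List.range'_succ, List.map_cons]
    have h0 := rows_lemma M (M.headD []).length hn M 0 (by simp)
    simp only [Nat.cast_zero] at h0
    rw [show (0:Nat)+1 = 2*0+1 by norm_num, h0,
        lineA_border_top M M.length (M.headD []).length (some (M.headD []))]
    rfl
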